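-- pv_equiv track=rewrite | github.com/Thirksha/propel-assignment2023 | assignment__3.py | sort_odd_even
-- ===== SOURCE A (Python) =====
-- def sort_odd_even(numbers):
--     odd_nos = []
--     even_nos =[]
--     for num in numbers:
--         if num%2!=0:
--             odd_nos.append(num)
--         else:
--             even_nos.append(num)
--     odd_nos.sort()
--     even_nos.sort()
--     return odd_nos+even_nos
-- ===== SOURCE B (Python) =====
-- def sort_odd_even(numbers):
--     s = sorted(numbers)
--     return [n for n in s if n % 2 != 0] + [n for n in s if n % 2 == 0]
-- ===== Notes on version B (the rewrite author's own statement) =====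
-- stated objective: simpler
-- what changed: Instead of partitioning first and running two separate sorts, B sorts the whole list once and then filters the sorted list by parity with two comprehensions; sorting preserves relative order within each parity class, so the result is identical.
import Mathlib
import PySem

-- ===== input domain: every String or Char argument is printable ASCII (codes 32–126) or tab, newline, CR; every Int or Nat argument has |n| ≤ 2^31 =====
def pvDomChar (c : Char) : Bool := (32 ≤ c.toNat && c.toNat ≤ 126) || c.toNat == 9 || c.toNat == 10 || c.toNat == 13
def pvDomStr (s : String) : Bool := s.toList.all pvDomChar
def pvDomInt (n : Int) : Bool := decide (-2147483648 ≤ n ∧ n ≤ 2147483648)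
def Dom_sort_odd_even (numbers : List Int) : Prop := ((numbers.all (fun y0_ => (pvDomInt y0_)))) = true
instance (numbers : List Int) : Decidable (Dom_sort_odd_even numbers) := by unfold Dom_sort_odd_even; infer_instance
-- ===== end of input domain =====

-- B sorts the list once and partitions the sorted list by parity (two filters), instead of A's
-- partition-then-sort-each; same result, a simpler decomposition.

-- ===== PORT A =====
-- loop appending each num to odd_nos or even_nos, then sort each and concatenate
def sort_odd_even (numbers : List Int) : List Int :=
  let p := numbers.foldl
    (fun (acc : List Int × List Int) num =>
      if PySem.Int.mod num 2 ≠ 0 then (acc.1 ++ [num], acc.2) else (acc.1, acc.2 ++ [num]))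
    ([], [])
  PySem.List.sorted p.1 (fun x => x) false ++ PySem.List.sorted p.2 (fun x => x) false

-- ===== PORT B =====
def sort_odd_even_alt (numbers : List Int) : List Int :=
  let s := PySem.List.sorted numbers (fun x => x) false
  (s.filter (fun n => PySem.Int.mod n 2 ≠ 0)) ++ (s.filter (fun n => PySem.Int.mod n 2 == 0))

-- ===== PRECONDITION & SPEC =====
def Spec_sort_odd_even (numbers : List Int) (out : List Int) : Prop := out = sort_odd_even_alt numbers
instance (numbers : List Int) (out : List Int) : Decidable (Spec_sort_odd_even numbers out) := by unfold Spec_sort_odd_even; infer_instance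

-- ===== CLAIM (what is proved, stated in full; the proofs are below) =====
def Claim_equal_sort_odd_even : Prop := ∀ (numbers : List Int), Dom_sort_odd_even numbers → Spec_sort_odd_even numbers (sort_odd_even numbers)

-- ===== LEMMAS AND PROOFS =====

-- A's loop computes the two parity filters of the input list.
theorem pv_fold_partition (l a b : List Int) :
    l.foldl
      (fun (acc : List Int × List Int) num =>
        if PySem.Int.mod num 2 ≠ 0 then (acc.1 ++ [num], acc.2) else (acc.1, acc.2 ++ [num]))
      (a, b)
    = (a ++ l.filter (fun n => PySem.Int.mod n 2 ≠ 0),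
       b ++ l.filter (fun n => PySem.Int.mod n 2 == 0)) := by
  induction l generalizing a b with
  | nil => simp
  | cons x xs ih =>
    rw [List.foldl_cons]
    by_cases hx : PySem.Int.mod x 2 ≠ 0
    · have hd : (decide (PySem.Int.mod x 2 ≠ 0)) = true := decide_eq_true hx
      have h2 : (PySem.Int.mod x 2 == 0) = false := beq_eq_false_iff_ne.mpr hx
      rw [if_pos hx, ih, List.filter_cons, List.filter_cons, hd, h2]
      simp
    · have hx0 : PySem.Int.mod x 2 = 0 := not_not.mp hx
      have hd : (decide (PySem.Int.mod x 2 ≠ 0)) = false := decide_eq_false hx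
      have h2 : (PySem.Int.mod x 2 == 0) = true := beq_iff_eq.mpr hx0
      rw [if_neg hx, ih, List.filter_cons, List.filter_cons, hd, h2]
      simp

-- sorting commutes with filtering (Int, identity key): filter of the sorted list is itself
-- a sorted rearrangement of the filtered list.
theorem pv_sorted_filter (l : List Int) (p : Int → Bool) :
    PySem.List.sorted (l.filter p) (fun x => x) false
      = (PySem.List.sorted l (fun x => x) false).filter p := by
  apply PySem.List.sorted_id_eq_of_perm_of_pairwise
  · exact (PySem.List.sorted_perm l (fun x => x) false).filter p
  · exact (PySem.List.sorted_pairwise l (fun x => x)).filter p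

-- ===== VERDICT (by name: the statement is the Claim_ definition above) =====
theorem sort_odd_even_spec : Claim_equal_sort_odd_even := by
  intro numbers _
  show _ = _
  simp only [sort_odd_even, sort_odd_even_alt, pv_fold_partition, List.nil_append]
  rw [pv_sorted_filter, pv_sorted_filter]
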